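-- pv_equiv track=rewrite | github.com/Mate0521/Dise-oLogico | 1Proy_DL.py | unicode_caracteres_seguros
-- ===== SOURCE A (Python) =====
-- def unicode_caracteres_seguros(base):
--     """Genera caracteres Unicode seguros excluyendo controles y espacios"""
--     caracteres = []
--     current = 33  # Empezar desde '!'
--     while len(caracteres) < base:
--         if current >= 0x10FFFF:  # Límite máximo de Unicode
--             raise ValueError(f"Base {base} excede el límite de caracteres seguros.")
--         # Excluir caracteres problemáticos
--         if not (
--             current <= 32 or          # Controles y espacio
--             127 <= current <= 159 or  # Caracteres de control extendidos
--             0xD800 <= current <= 0xDFFF or  # Suplentes UTF-16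
--             current in {0x2028, 0x2029, 0xFEFF}  # Separadores y BOM
--         ):
--             caracteres.append(chr(current))
--         current += 1
--     return ''.join(caracteres)
-- ===== SOURCE B (Python) =====
-- # Interval-table implementation: emit whole precomputed runs of safe codepoints
-- # instead of testing every codepoint against exclusion predicates.
-- _INTERVALS = [
--     (33, 126),
--     (160, 0x2027),
--     (0x202A, 0xD7FF),
--     (0xE000, 0xFEFE),
--     (0xFF00, 0x10FFFE),
-- ]
--
-- def unicode_caracteres_seguros(base):
--     partes = []
--     restante = base
--     for lo, hi in _INTERVALS:
--         if restante <= 0: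
--             break
--         n = hi - lo + 1
--         toma = n if n <= restante else restante
--         partes.append(''.join(map(chr, range(lo, lo + toma))))
--         restante -= toma
--     if restante > 0:
--         raise ValueError(f"Base {base} excede el límite de caracteres seguros.")
--     return ''.join(partes)
-- ===== Notes on version B (the rewrite author's own statement) =====
-- stated objective: faster
-- what changed: B replaces the per-codepoint scan with per-predicate exclusion tests by a precomputed table of five safe-codepoint intervals, emitting each run wholesale and raising the identical ValueError when the table is exhausted.
import Mathlib
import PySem

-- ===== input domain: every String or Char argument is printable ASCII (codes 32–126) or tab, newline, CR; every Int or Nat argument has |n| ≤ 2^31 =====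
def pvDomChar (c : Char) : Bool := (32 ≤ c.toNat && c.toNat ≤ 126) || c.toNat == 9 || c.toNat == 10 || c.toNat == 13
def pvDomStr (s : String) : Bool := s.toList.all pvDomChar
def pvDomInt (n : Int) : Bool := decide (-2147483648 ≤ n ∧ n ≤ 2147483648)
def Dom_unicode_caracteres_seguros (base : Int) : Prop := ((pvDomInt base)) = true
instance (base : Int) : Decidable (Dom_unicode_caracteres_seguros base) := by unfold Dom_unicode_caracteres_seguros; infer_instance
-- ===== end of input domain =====

-- B replaces the per-codepoint predicate scan by a precomputed table of five safe intervals (faster by a constant factor).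

-- ===== PORT A =====
-- the exclusion condition of A's inner `if not (...)`
def pySafe (current : Nat) : Bool :=
  !(decide (current ≤ 32) ||
    (decide (127 ≤ current) && decide (current ≤ 159)) ||
    (decide (0xD800 ≤ current) && decide (current ≤ 0xDFFF)) ||
    (current == 0x2028 || current == 0x2029 || current == 0xFEFF))

-- A's while-loop; the `0x10FFFF ≤ current` branch is Python's `raise ValueError` (excluded by Pre_)
def uniLoopA (base : Int) (caracteres : List Char) (current : Nat) : List Char :=
  if (caracteres.length : Int) < base then
    if 0x10FFFF ≤ current then caracteres  -- raise ValueError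
    else if pySafe current then uniLoopA base (caracteres ++ [Char.ofNat current]) (current + 1)
    else uniLoopA base caracteres (current + 1)
  else caracteres
termination_by 0x10FFFF - current
decreasing_by all_goals omega

def unicode_caracteres_seguros (base : Int) : String :=
  String.mk (uniLoopA base [] 33)

-- ===== PORT B =====
def intervalsB : List (Nat × Nat) :=
  [(33, 126), (160, 0x2027), (0x202A, 0xD7FF), (0xE000, 0xFEFE), (0xFF00, 0x10FFFE)]

-- one step of B's for-loop over the interval table (the `break` is the rem ≤ 0 guard)
def uniStepB (st : List Char × Int) (iv : Nat × Nat) : List Char × Int :=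
  if st.2 ≤ 0 then st
  else if ((iv.2 - iv.1 + 1 : Nat) : Int) ≤ st.2 then
    (st.1 ++ (List.range' iv.1 (iv.2 - iv.1 + 1)).map Char.ofNat, st.2 - ((iv.2 - iv.1 + 1 : Nat) : Int))
  else
    (st.1 ++ (List.range' iv.1 st.2.toNat).map Char.ofNat, st.2 - (st.2.toNat : Int))

def unicode_caracteres_seguros_alt (base : Int) : String :=
  let r := intervalsB.foldl uniStepB ([], base)
  if 0 < r.2 then ""  -- raise ValueError
  else String.mk r.1

-- ===== PRECONDITION & SPEC =====
-- Pre_ excludes exactly the inputs on which A (and B) raise ValueError: base larger than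
-- the 1111994 safe codepoints below 0x10FFFF.
def Pre_unicode_caracteres_seguros (base : Int) : Prop := base ≤ 1111994
instance (base : Int) : Decidable (Pre_unicode_caracteres_seguros base) := by
  unfold Pre_unicode_caracteres_seguros; infer_instance

def pvWitness_unicode_caracteres_seguros : Int := 5

def Spec_unicode_caracteres_seguros (base : Int) (out : String) : Prop := out = unicode_caracteres_seguros_alt base
instance (base : Int) (out : String) : Decidable (Spec_unicode_caracteres_seguros base out) := by unfold Spec_unicode_caracteres_seguros; infer_instance

-- ===== CLAIM (what is proved, stated in full; the proofs are below) =====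
def Claim_equal_unicode_caracteres_seguros : Prop := ∀ (base : Int), Dom_unicode_caracteres_seguros base → Pre_unicode_caracteres_seguros base → Spec_unicode_caracteres_seguros base (unicode_caracteres_seguros base)

-- ===== LEMMAS AND PROOFS =====

-- splitting a range' (step 1) into two contiguous pieces
lemma range'_split (s m n : Nat) : List.range' s (m + n) = List.range' s m ++ List.range' (s + m) n := by
  rw [← List.range'_append (s := s) (m := m) (n := n) (step := 1)]
  norm_num

lemma take_range' (s n m : Nat) : (List.range' s n).take m = List.range' s (min n m) := by
  induction n generalizing s m with
  | zero => simp
  | succ n ih =>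
    cases m with
    | zero => simp
    | succ m =>
      rw [List.range'_succ, List.take_succ_cons, ih, ← List.range'_succ,
          show min n m + 1 = min (n + 1) (m + 1) from by omega]

lemma filter_safe_all (s n : Nat) (h : ∀ x : Nat, s ≤ x → x < s + n → pySafe x = true) :
    (List.range' s n).filter pySafe = List.range' s n := by
  apply List.filter_eq_self.mpr
  intro x hx
  have hm := List.mem_range'_1.mp hx
  exact h x hm.1 hm.2

lemma filter_safe_none (s n : Nat) (h : ∀ x : Nat, s ≤ x → x < s + n → pySafe x = false) :
    (List.range' s n).filter pySafe = [] := by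
  apply List.filter_eq_nil_iff.mpr
  intro x hx
  have hm := List.mem_range'_1.mp hx
  simp [h x hm.1 hm.2]

-- the flattened safe-interval table
def flatSafe : List Nat :=
  List.range' 33 94 ++ List.range' 160 8072 ++ List.range' 8234 47062 ++
    List.range' 57344 7935 ++ List.range' 65280 1048831

-- A's filtered scan range equals the flattened interval table
lemma filter_safe_eq : (List.range' 33 1114078).filter pySafe = flatSafe := by
  have e1 : List.range' 33 1114078 =
      List.range' 33 94 ++ List.range' 127 33 ++ List.range' 160 8072 ++ List.range' 8232 2 ++
      List.range' 8234 47062 ++ List.range' 55296 2048 ++ List.range' 57344 7935 ++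
      List.range' 65279 1 ++ List.range' 65280 1048831 := by
    rw [show (1114078 : Nat) = 94 + 1113984 from rfl, range'_split,
        show (1113984 : Nat) = 33 + 1113951 from rfl, range'_split,
        show (1113951 : Nat) = 8072 + 1105879 from rfl, range'_split,
        show (1105879 : Nat) = 2 + 1105877 from rfl, range'_split,
        show (1105877 : Nat) = 47062 + 1058815 from rfl, range'_split,
        show (1058815 : Nat) = 2048 + 1056767 from rfl, range'_split,
        show (1056767 : Nat) = 7935 + 1048832 from rfl, range'_split,
        show (1048832 : Nat) = 1 + 1048831 from rfl, range'_split]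
    simp [List.append_assoc]
  rw [e1]
  simp only [List.filter_append]
  rw [filter_safe_all 33 94 (by intro x h1 h2; simp [pySafe]; omega),
      filter_safe_none 127 33 (by intro x h1 h2; simp [pySafe]; omega),
      filter_safe_all 160 8072 (by intro x h1 h2; simp [pySafe]; omega),
      filter_safe_none 8232 2 (by intro x h1 h2; simp [pySafe]; omega),
      filter_safe_all 8234 47062 (by intro x h1 h2; simp [pySafe]; omega),
      filter_safe_none 55296 2048 (by intro x h1 h2; simp [pySafe]; omega),
      filter_safe_all 57344 7935 (by intro x h1 h2; simp [pySafe]; omega),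
      filter_safe_none 65279 1 (by intro x h1 h2; simp [pySafe]; omega),
      filter_safe_all 65280 1048831 (by intro x h1 h2; simp [pySafe]; omega)]
  simp [flatSafe]

lemma flatSafe_length : flatSafe.length = 1111994 := by
  simp [flatSafe]

-- A's loop collects the first (base - |cars|) safe codepoints of the remaining scan range
lemma loopA_eq (fuel : Nat) : ∀ (current : Nat) (cars : List Char) (base : Int),
    current + fuel = 0x10FFFF →
    base - cars.length ≤ (((List.range' current fuel).filter pySafe).length : Int) →
    uniLoopA base cars current =
      cars ++ (((List.range' current fuel).filter pySafe).take (base - cars.length).toNat).map Char.ofNat := by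
  induction fuel with
  | zero =>
    intro current cars base hc hlen
    simp only [List.range'_zero, List.filter_nil, List.length_nil] at hlen ⊢
    rw [uniLoopA]
    have : ¬ ((cars.length : Int) < base) := by push_cast at hlen ⊢; omega
    simp [this, Int.toNat_of_nonpos (by omega)]
  | succ fuel ih =>
    intro current cars base hc hlen
    have hcur : ¬ (0x10FFFF ≤ current) := by omega
    rw [List.range'_succ] at hlen ⊢
    rw [uniLoopA]
    by_cases h : (cars.length : Int) < base
    · rw [if_pos h, if_neg hcur]
      by_cases hs : pySafe current = true
      · rw [if_pos hs]
        rw [List.filter_cons_of_pos hs] at hlen ⊢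
        rw [ih (current + 1) (cars ++ [Char.ofNat current]) base (by omega)
            (by simp at hlen ⊢; omega)]
        have hk : (base - cars.length).toNat = (base - (cars ++ [Char.ofNat current]).length).toNat + 1 := by
          simp; omega
        rw [hk, List.take_succ_cons, List.map_cons]
        simp [List.append_assoc]
      · rw [if_neg (by simp [hs])]
        rw [List.filter_cons_of_neg (by simp [hs])] at hlen ⊢
        exact ih (current + 1) cars base (by omega) hlen
    · rw [if_neg h]
      have : (base - cars.length).toNat = 0 := by omega
      simp [this]

-- B's fold over any interval list appends the first rem codepoints of the flattened intervals
lemma foldB_eq : ∀ (ivs : List (Nat × Nat)) (out : List Char) (rem : Int),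
    ivs.foldl uniStepB (out, rem) =
      (out ++ (((ivs.map (fun iv => List.range' iv.1 (iv.2 - iv.1 + 1))).flatten.take rem.toNat).map Char.ofNat),
       rem - min rem.toNat ((ivs.map (fun iv => List.range' iv.1 (iv.2 - iv.1 + 1))).flatten.length)) := by
  intro ivs
  induction ivs with
  | nil => intro out rem; simp
  | cons iv rest ih =>
    intro out rem
    simp only [List.foldl_cons, List.map_cons, List.flatten_cons]
    by_cases h0 : rem ≤ 0
    · have hr0 : rem.toNat = 0 := by omega
      rw [show uniStepB (out, rem) iv = (out, rem) from by rw [uniStepB, if_pos h0], ih, hr0]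
      simp
    · have hpos : 0 < rem := by omega
      have hlen : (List.range' iv.1 (iv.2 - iv.1 + 1)).length = iv.2 - iv.1 + 1 := List.length_range' ..
      by_cases hle : ((iv.2 - iv.1 + 1 : Nat) : Int) ≤ rem
      · rw [show uniStepB (out, rem) iv =
            (out ++ (List.range' iv.1 (iv.2 - iv.1 + 1)).map Char.ofNat,
             rem - ((iv.2 - iv.1 + 1 : Nat) : Int)) from by
          rw [uniStepB, if_neg h0, if_pos hle], ih]
        have key : (List.range' iv.1 (iv.2 - iv.1 + 1) ++
              (rest.map (fun iv => List.range' iv.1 (iv.2 - iv.1 + 1))).flatten).take rem.toNat =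
            List.range' iv.1 (iv.2 - iv.1 + 1) ++
              (rest.map (fun iv => List.range' iv.1 (iv.2 - iv.1 + 1))).flatten.take
                (rem - ((iv.2 - iv.1 + 1 : Nat) : Int)).toNat := by
          rw [List.take_append, hlen, List.take_of_length_le (by rw [hlen]; omega),
              show rem.toNat - (iv.2 - iv.1 + 1) = (rem - ((iv.2 - iv.1 + 1 : Nat) : Int)).toNat from by omega]
        rw [Prod.mk.injEq]
        refine ⟨?_, ?_⟩
        · rw [key, List.map_append, List.append_assoc]
        · rw [List.length_append, hlen]
          omega
      · rw [show uniStepB (out, rem) iv =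
            (out ++ (List.range' iv.1 rem.toNat).map Char.ofNat, rem - (rem.toNat : Int)) from by
          rw [uniStepB, if_neg h0, if_neg hle],
          show rem - (rem.toNat : Int) = 0 from by omega, ih]
        have key : (List.range' iv.1 (iv.2 - iv.1 + 1) ++
              (rest.map (fun iv => List.range' iv.1 (iv.2 - iv.1 + 1))).flatten).take rem.toNat =
            List.range' iv.1 rem.toNat := by
          rw [List.take_append, hlen, take_range',
              show min (iv.2 - iv.1 + 1) rem.toNat = rem.toNat from by omega,
              show rem.toNat - (iv.2 - iv.1 + 1) = 0 from by omega]
          simp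
        rw [Prod.mk.injEq]
        refine ⟨?_, ?_⟩
        · rw [key]
          simp
        · rw [List.length_append, hlen]
          omega

-- the table in intervalsB flattens to flatSafe
lemma intervalsB_flatten :
    (intervalsB.map (fun iv => List.range' iv.1 (iv.2 - iv.1 + 1))).flatten = flatSafe := by
  simp [intervalsB, flatSafe]

-- ===== VERDICT (by name: the statement is the Claim_ definition above) =====
theorem unicode_caracteres_seguros_spec : Claim_equal_unicode_caracteres_seguros := by
  intro base _ hpre
  unfold Spec_unicode_caracteres_seguros unicode_caracteres_seguros unicode_caracteres_seguros_alt
  have hA := loopA_eq 1114078 33 [] base (by norm_num)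
    (by rw [filter_safe_eq, flatSafe_length]; simpa using hpre)
  rw [filter_safe_eq] at hA
  rw [foldB_eq, intervalsB_flatten, flatSafe_length]
  have hpre' : base ≤ 1111994 := hpre
  have hr2 : ¬ (0 < base - min base.toNat 1111994) := by omega
  simp only [hr2, if_false]
  rw [hA]
  simp
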